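-- pv_equiv track=rewrite | github.com/sueszli/vector-database-benchmark | dataset/python-mutated/indirect_confirmation_measure.py | _map_to_contiguous
-- ===== SOURCE A (Python) =====
-- import itertools
--
-- def _map_to_contiguous(ids_iterable):
--     if False:
--         return 10
--     uniq_ids = {}
--     n = 0
--     for id_ in itertools.chain.from_iterable(ids_iterable):
--         if id_ not in uniq_ids:
--             uniq_ids[id_] = n
--             n += 1
--     return uniq_ids
-- ===== SOURCE B (Python) =====
-- import itertools
--
-- def _map_to_contiguous(ids_iterable):
--     # sieve: repeatedly take the first remaining id as the next index,
--     # then filter every copy of it out of the rest; no seen-set needed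
--     xs = list(itertools.chain.from_iterable(ids_iterable))
--     out = {}
--     n = 0
--     while xs:
--         h = xs[0]
--         out[h] = n
--         n += 1
--         xs = [x for x in xs[1:] if x != h]
--     return out
-- ===== Notes on version B (the rewrite author's own statement) =====
-- stated objective: alternative
-- what changed: Replaces A's single pass with a membership-tested dict and manual counter by a sieve: repeatedly emit the head of the remaining flattened list as the next index and filter all of its copies out of the rest, so no seen-set or membership test exists at all.
import Mathlib
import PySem

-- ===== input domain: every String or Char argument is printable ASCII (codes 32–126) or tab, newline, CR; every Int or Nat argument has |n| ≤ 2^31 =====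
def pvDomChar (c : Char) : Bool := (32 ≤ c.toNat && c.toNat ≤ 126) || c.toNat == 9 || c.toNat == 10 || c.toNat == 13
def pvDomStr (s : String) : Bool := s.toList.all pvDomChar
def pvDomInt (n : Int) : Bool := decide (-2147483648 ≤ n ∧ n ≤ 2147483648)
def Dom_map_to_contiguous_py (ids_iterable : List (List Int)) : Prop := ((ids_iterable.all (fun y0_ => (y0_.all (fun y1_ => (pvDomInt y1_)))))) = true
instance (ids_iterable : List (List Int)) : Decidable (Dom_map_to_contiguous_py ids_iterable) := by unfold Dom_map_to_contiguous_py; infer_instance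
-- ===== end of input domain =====

-- B is an alternative algorithm (a sieve over the flattened list, no seen-set), not a speed claim.

-- ===== PORT A =====
-- the 'if False: return 10' guard in A is dead code and is not ported
def map_to_contiguous_py (ids_iterable : List (List Int)) : List (Int × Int) :=
  let st := (ids_iterable.flatMap id).foldl
    (fun (st : PySem.Dict Int Int × Int) id_ =>
      if st.1.contains id_ then st else (st.1.insert id_ st.2, st.2 + 1))
    (PySem.Dict.empty, 0)
  st.1.items

-- ===== PORT B =====
-- the while loop of Source B: head becomes the next pair, its copies are filtered from the rest
def pvSieve : List Int → Int → List (Int × Int)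
  | [], _ => []
  | h :: t, n => (h, n) :: pvSieve (t.filter (fun x => x ≠ h)) (n + 1)
  termination_by xs _ => xs.length
  decreasing_by
    simpa using Nat.lt_succ_of_le (le_trans (List.length_filter_le _ t.attach) (by simp))

def map_to_contiguous_py_alt (ids_iterable : List (List Int)) : List (Int × Int) :=
  pvSieve (ids_iterable.flatMap id) 0

-- ===== PRECONDITION & SPEC =====
def Spec_map_to_contiguous_py (ids_iterable : List (List Int)) (out : List (Int × Int)) : Prop := out = map_to_contiguous_py_alt ids_iterable
instance (ids_iterable : List (List Int)) (out : List (Int × Int)) : Decidable (Spec_map_to_contiguous_py ids_iterable out) := by unfold Spec_map_to_contiguous_py; infer_instance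

-- ===== CLAIM (what is proved, stated in full; the proofs are below) =====
def Claim_equal_map_to_contiguous_py : Prop := ∀ (ids_iterable : List (List Int)), Dom_map_to_contiguous_py ids_iterable → Spec_map_to_contiguous_py ids_iterable (map_to_contiguous_py ids_iterable)

-- ===== LEMMAS AND PROOFS =====

-- unfolding equations for pvSieve (its WF recursion hides the defeq behind attach)
theorem pvSieve_nil (n : Int) : pvSieve [] n = [] := by
  rw [pvSieve.eq_def]

theorem pvSieve_cons (h : Int) (t : List Int) (n : Int) :
    pvSieve (h :: t) n = (h, n) :: pvSieve (t.filter (fun x => x ≠ h)) (n + 1) := by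
  rw [pvSieve.eq_def]

-- the pairs A's fold produces past a set of already-seen keys
def pvGo (seen : List Int) (n : Int) : List Int → List (Int × Int)
  | [] => []
  | x :: xs => if x ∈ seen then pvGo seen n xs
               else (x, n) :: pvGo (seen ++ [x]) (n + 1) xs

theorem pvFoldA (l : List Int) (d : PySem.Dict Int Int) (n : Int) :
    ((l.foldl (fun (st : PySem.Dict Int Int × Int) id_ =>
        if st.1.contains id_ then st else (st.1.insert id_ st.2, st.2 + 1)) (d, n)).1).items
      = d.items ++ pvGo d.keys n l := by
  induction l generalizing d n with
  | nil => simp [pvGo]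
  | cons x xs ih =>
    by_cases h : x ∈ d.keys
    · have hc : d.contains x = true := (PySem.Dict.contains_iff_mem_keys d x).2 h
      simp [List.foldl_cons, hc, pvGo, h, ih]
    · have hc : d.contains x = false := by
        rw [Bool.eq_false_iff]
        intro hb
        exact h ((PySem.Dict.contains_iff_mem_keys d x).1 hb)
      simp only [List.foldl_cons, hc, if_false, Bool.false_eq_true, pvGo, h]
      rw [ih]
      rw [PySem.Dict.items_insert, hc, PySem.Dict.keys_insert_of_not_contains (h := hc)]
      simp

-- A's seen-set recursion equals B's sieve on the list with the seen elements filtered out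
theorem pvGo_eq_sieve (l : List Int) (seen : List Int) (n : Int) :
    pvGo seen n l = pvSieve (l.filter (fun x => x ∉ seen)) n := by
  induction l generalizing seen n with
  | nil => simp [pvGo, pvSieve_nil]
  | cons x xs ih =>
    by_cases h : x ∈ seen
    · simp [pvGo, h, ih]
    · have hf : List.filter (fun y => !decide (y = x)) (xs.filter (fun y => !decide (y ∈ seen)))
          = xs.filter (fun y => !decide (y ∈ seen ++ [x])) := by
        rw [List.filter_filter]
        apply List.filter_congr
        intro y _
        by_cases hy : y = x <;> by_cases hs : y ∈ seen <;>
          simp [hy, hs, List.mem_append]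
      simp only [pvGo, if_neg h, decide_not]
      rw [List.filter_cons_of_pos (by simp [h]), pvSieve_cons, ih]
      simp only [decide_not]
      rw [← hf]

-- ===== VERDICT (by name: the statement is the Claim_ definition above) =====
theorem map_to_contiguous_py_spec : Claim_equal_map_to_contiguous_py := by
  intro ids _
  unfold Spec_map_to_contiguous_py map_to_contiguous_py map_to_contiguous_py_alt
  rw [pvFoldA, pvGo_eq_sieve]
  have h1 : (PySem.Dict.empty : PySem.Dict Int Int).items = [] := rfl
  rw [h1, List.nil_append]
  congr 1
  rw [List.filter_eq_self]
  intro a _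
  simp [PySem.Dict.empty]
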